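-- pv_equiv track=rewrite | github.com/genhub-bio/gen | python/prototyping/make_nets.py | make_nets
-- ===== SOURCE A (Python) =====
-- from itertools import chain
-- from typing import List, Set, Dict, Any
--
-- def make_nets(bicliques: list[tuple[Set[Any], Set[Any]]]):
--     """
--     Partition the edges of each biclique into nets, which are non-overlapping
--     bicliques chosen such that each edge is included in exactly one net,
--     preferentially the largest biclique.
--
--     Returns a list of sets, each containing the edges of a net.
--     """
--
--     # Sort the bicliques by number of edges (descending)
--     bicliques.sort(key=lambda x: len(x[0]) * len(x[1]), reverse=True)
--
--     # Each biclique results in a net, with the restriction that: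
--     # - nodes may be shared between nets
--     # - edges are not duplicated
--
--     # We will build the nets one by one, starting with the largest biclique
--     # and removing edges that have already been used.
--     nets = []
--     for L, R in bicliques:
--         biclique_edges = set([(u, v) for u in L for v in R])
--         unique_edges = biclique_edges - set(chain(*nets))
--         if not unique_edges:
--             continue
--         nets.append(unique_edges)
--     return nets
-- ===== SOURCE B (Python) =====
-- # Faster re-implementation: maintain one cumulative set of used edges and build
-- # each net in a single pass over the biclique's edge grid, instead of rebuilding
-- # the union of all previous nets for every biclique.  Like A, it sorts the
-- # input list in place; the equivalence proved is about the return value.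
-- def make_nets(bicliques):
--     bicliques.sort(key=lambda x: len(x[0]) * len(x[1]), reverse=True)
--     nets = []
--     used = set()
--     for L, R in bicliques:
--         net = set()
--         for u in L:
--             for v in R:
--                 e = (u, v)
--                 if e not in used:
--                     net.add(e)
--                     used.add(e)
--         if net:
--             nets.append(net)
--     return nets
-- ===== Notes on version B (the rewrite author's own statement) =====
-- stated objective: faster
-- what changed: B keeps one cumulative set of used edges, updated incrementally, and collects each net in a single pass over the biclique's edge grid, instead of A's rebuilding of the union of all previous nets (set(chain(*nets))) from scratch for every biclique.
import Mathlib
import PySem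

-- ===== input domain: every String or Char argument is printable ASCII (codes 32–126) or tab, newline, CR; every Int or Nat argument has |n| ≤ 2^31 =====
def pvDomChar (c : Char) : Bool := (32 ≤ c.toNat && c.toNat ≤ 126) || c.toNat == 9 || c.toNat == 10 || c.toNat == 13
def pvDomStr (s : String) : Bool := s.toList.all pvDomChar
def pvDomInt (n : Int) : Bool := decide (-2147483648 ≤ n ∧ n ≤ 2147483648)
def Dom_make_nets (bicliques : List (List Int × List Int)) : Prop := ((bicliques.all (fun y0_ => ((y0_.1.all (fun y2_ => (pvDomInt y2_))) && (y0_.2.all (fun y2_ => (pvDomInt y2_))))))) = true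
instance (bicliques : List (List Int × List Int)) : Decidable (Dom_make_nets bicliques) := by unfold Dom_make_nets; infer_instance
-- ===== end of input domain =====

-- B maintains one cumulative used-edge set updated incrementally instead of A's per-iteration
-- rebuild of set(chain(*nets)); both sort the input in place (equivalence is about the return value).

-- ===== PORT A =====
-- A's loop body: build the biclique's edge set, subtract the union of all previous nets, skip if empty.
def pvStepA (nets : List (List (Int × Int))) (b : List Int × List Int) : List (List (Int × Int)) :=
  let biclique_edges : PySem.Set (Int × Int) :=
    PySem.Set.ofList ((PySem.Set.ofList b.1).flatMap (fun u => (PySem.Set.ofList b.2).map (fun v => (u, v))))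
  let unique_edges : PySem.Set (Int × Int) :=
    PySem.Set.diff biclique_edges (PySem.Set.ofList nets.flatten)
  if unique_edges.isEmpty then nets else nets ++ [unique_edges]

def make_nets (bicliques : List (List Int × List Int)) : List (List (Int × Int)) :=
  let sortedBs := PySem.List.sorted bicliques
      (fun x => (PySem.Set.ofList x.1).length * (PySem.Set.ofList x.2).length) true
  sortedBs.foldl pvStepA []

-- ===== PORT B =====
-- B's innermost step: if the edge is not yet used, add it to the current net and to the used set.
def pvAddB (st : PySem.Set (Int × Int) × PySem.Set (Int × Int)) (e : Int × Int) :
    PySem.Set (Int × Int) × PySem.Set (Int × Int) :=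
  if PySem.Set.contains st.2 e then st else (PySem.Set.add st.1 e, PySem.Set.add st.2 e)

-- B's loop body: one pass over the edge grid collecting fresh edges, threading the cumulative used set.
def pvStepB (st : List (List (Int × Int)) × PySem.Set (Int × Int)) (b : List Int × List Int) :
    List (List (Int × Int)) × PySem.Set (Int × Int) :=
  let inner := (PySem.Set.ofList b.1).foldl
      (fun st2 u => (PySem.Set.ofList b.2).foldl (fun st3 v => pvAddB st3 (u, v)) st2)
      ((PySem.Set.empty : PySem.Set (Int × Int)), st.2)
  if inner.1.isEmpty then (st.1, inner.2) else (st.1 ++ [inner.1], inner.2)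

def make_nets_alt (bicliques : List (List Int × List Int)) : List (List (Int × Int)) :=
  let sortedBs := PySem.List.sorted bicliques
      (fun x => (PySem.Set.ofList x.1).length * (PySem.Set.ofList x.2).length) true
  (sortedBs.foldl pvStepB ([], PySem.Set.empty)).1

-- ===== PRECONDITION & SPEC =====
def Spec_make_nets (bicliques : List (List Int × List Int)) (out : List (List (Int × Int))) : Prop := out = make_nets_alt bicliques
instance (bicliques : List (List Int × List Int)) (out : List (List (Int × Int))) : Decidable (Spec_make_nets bicliques out) := by unfold Spec_make_nets; infer_instance

-- ===== CLAIM (what is proved, stated in full; the proofs are below) =====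
def Claim_equal_make_nets : Prop := ∀ (bicliques : List (List Int × List Int)), Dom_make_nets bicliques → Spec_make_nets bicliques (make_nets bicliques)

-- ===== LEMMAS AND PROOFS =====

-- B's inner double fold, flattened to a single fold over the product list A builds.
theorem pv_inner_eq_foldl (L R : List Int) (st : PySem.Set (Int × Int) × PySem.Set (Int × Int)) :
    (PySem.Set.ofList L).foldl
      (fun st2 u => (PySem.Set.ofList R).foldl (fun st3 v => pvAddB st3 (u, v)) st2) st
    = ((PySem.Set.ofList L).flatMap (fun u => (PySem.Set.ofList R).map (fun v => (u, v)))).foldl pvAddB st := by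
  generalize PySem.Set.ofList L = l
  induction l generalizing st with
  | nil => rfl
  | cons u tl ih =>
      simp only [List.flatMap_cons, List.foldl_append, List.foldl_cons, List.foldl_map, ih]

-- the fold of pvAddB over any edge list (net kept inside used): net collects the first
-- occurrences of edges not yet used, used becomes its update by the list.
theorem pv_foldl_addB (P : List (Int × Int)) (net used : PySem.Set (Int × Int))
    (hsub : ∀ x ∈ net, x ∈ used) :
    P.foldl pvAddB (net, used)
      = (net ++ (PySem.Set.ofList P).filter (fun e => !PySem.Set.contains used e),
         PySem.Set.update used P) := by
  induction P generalizing net used with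
  | nil => simp [PySem.Set.update]
  | cons e tl ih =>
      by_cases he : e ∈ used
      · have h1 : pvAddB (net, used) e = (net, used) := by simp [pvAddB, he]
        have hupd : PySem.Set.update used (e :: tl) = PySem.Set.update used tl := by
          simp [PySem.Set.update, PySem.Set.add, he]
        have hfil : (PySem.Set.ofList (e :: tl)).filter (fun x => !PySem.Set.contains used x)
            = (PySem.Set.ofList tl).filter (fun x => !PySem.Set.contains used x) := by
          have hd : PySem.Set.discard (PySem.Set.ofList tl) e
              = (PySem.Set.ofList tl).filter (fun y => !(y == e)) := rfl
          simp only [PySem.Set.ofList_cons, List.filter_cons, hd, List.filter_filter]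
          rw [if_neg (by simp [he])]
          apply List.filter_congr
          intro x _
          by_cases hx : x = e
          · subst hx; simp [he]
          · simp [hx]
        rw [List.foldl_cons, h1, ih net used hsub, hupd, hfil]
      · have hnet : e ∉ net := fun hc => he (hsub e hc)
        have h1 : pvAddB (net, used) e = (net ++ [e], used ++ [e]) := by
          simp [pvAddB, PySem.Set.add, he, hnet]
        have hupd : PySem.Set.update used (e :: tl) = PySem.Set.update (used ++ [e]) tl := by
          simp [PySem.Set.update, PySem.Set.add, he]
        have hfil : (PySem.Set.ofList (e :: tl)).filter (fun x => !PySem.Set.contains used x)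
            = e :: (PySem.Set.ofList tl).filter (fun x => !PySem.Set.contains (used ++ [e]) x) := by
          have hd : PySem.Set.discard (PySem.Set.ofList tl) e
              = (PySem.Set.ofList tl).filter (fun y => !(y == e)) := rfl
          simp only [PySem.Set.ofList_cons, List.filter_cons, hd, List.filter_filter]
          rw [if_pos (by simp [he])]
          congr 1
          apply List.filter_congr
          intro x _
          simp only [PySem.Set.contains_eq_listContains, List.contains_eq_mem, List.mem_append,
            List.mem_singleton]
          by_cases hx : x = e
          · subst hx; simp
          · by_cases hu : x ∈ used <;> simp [hx, hu]
        have hsub' : ∀ x ∈ net ++ [e], x ∈ used ++ [e] := by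
          intro x hx
          rcases List.mem_append.mp hx with h | h
          · exact List.mem_append.mpr (Or.inl (hsub x h))
          · exact List.mem_append.mpr (Or.inr h)
        rw [List.foldl_cons, h1, ih (net ++ [e]) (used ++ [e]) hsub', hupd, hfil]
        simp

-- if every element of P is already in used, updating by P changes nothing
theorem pv_update_of_subset (used : PySem.Set (Int × Int)) (P : List (Int × Int))
    (h : ∀ e ∈ P, e ∈ used) :
    PySem.Set.update used P = used := by
  induction P generalizing used with
  | nil => rfl
  | cons e tl ih =>
      have he : e ∈ used := h e (by simp)
      have hadd : PySem.Set.add used e = used := by simp [PySem.Set.add, he]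
      simp only [PySem.Set.update, List.foldl_cons, hadd]
      exact ih used (fun x hx => h x (by simp [hx]))

-- main loop invariant: if used has the same members as the flattened nets so far,
-- B's fold computes the same nets list as A's fold.
theorem pv_loop_eq (bs : List (List Int × List Int))
    (nets : List (List (Int × Int))) (used : PySem.Set (Int × Int))
    (hinv : ∀ e, e ∈ used ↔ e ∈ nets.flatten) :
    (bs.foldl pvStepB (nets, used)).1 = bs.foldl pvStepA nets := by
  induction bs generalizing nets used with
  | nil => rfl
  | cons b tl ih =>
      have hcont : ∀ e, PySem.Set.contains used e = PySem.Set.contains (PySem.Set.ofList nets.flatten) e := by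
        intro e
        by_cases h : e ∈ nets.flatten
        · simp [h, PySem.Set.mem_ofList, (hinv e).mpr h]
        · have hne : e ∉ used := fun hc => h ((hinv e).mp hc)
          simp [hne, PySem.Set.mem_ofList, h]
      set P := (PySem.Set.ofList b.1).flatMap (fun u => (PySem.Set.ofList b.2).map (fun v => (u, v))) with hP
      have hnet : (PySem.Set.ofList P).filter (fun e => !PySem.Set.contains used e)
          = PySem.Set.diff (PySem.Set.ofList P) (PySem.Set.ofList nets.flatten) := by
        show _ = (PySem.Set.ofList P).filter (fun e => !PySem.Set.contains (PySem.Set.ofList nets.flatten) e)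
        exact List.filter_congr (fun x _ => by rw [hcont])
      have hfold : P.foldl pvAddB ((PySem.Set.empty : PySem.Set (Int × Int)), used)
          = ((PySem.Set.ofList P).filter (fun e => !PySem.Set.contains used e),
             PySem.Set.update used P) := by
        simpa [PySem.Set.empty] using
          pv_foldl_addB P PySem.Set.empty used (by intro x hx; cases hx)
      have hupd : (PySem.Set.diff (PySem.Set.ofList P) (PySem.Set.ofList nets.flatten)).isEmpty = true →
          PySem.Set.update used P = used := by
        intro hemp
        apply pv_update_of_subset
        intro e heP
        by_contra hc
        have hnf : e ∉ nets.flatten := fun hin => hc ((hinv e).mpr hin)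
        have hmem : e ∈ PySem.Set.diff (PySem.Set.ofList P) (PySem.Set.ofList nets.flatten) := by
          rw [PySem.Set.mem_diff, PySem.Set.mem_ofList, PySem.Set.mem_ofList]
          exact ⟨heP, hnf⟩
        rw [List.isEmpty_iff] at hemp
        simp [hemp] at hmem
      have hstepB : pvStepB (nets, used) b
          = (pvStepA nets b,
             if (PySem.Set.diff (PySem.Set.ofList P) (PySem.Set.ofList nets.flatten)).isEmpty
             then used else PySem.Set.update used P) := by
        simp only [pvStepB, pvStepA, pv_inner_eq_foldl, ← hP, hfold, hnet]
        by_cases hemp : (PySem.Set.diff (PySem.Set.ofList P) (PySem.Set.ofList nets.flatten)).isEmpty = true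
        · rw [if_pos hemp, if_pos hemp, if_pos hemp, hupd hemp]
        · rw [if_neg hemp, if_neg hemp, if_neg hemp]
      rw [List.foldl_cons, List.foldl_cons, hstepB]
      by_cases hemp : (PySem.Set.diff (PySem.Set.ofList P) (PySem.Set.ofList nets.flatten)).isEmpty = true
      · rw [if_pos hemp]
        have hA : pvStepA nets b = nets := by
          simp only [pvStepA, ← hP]
          rw [if_pos hemp]
        rw [hA]
        exact ih nets used hinv
      · rw [if_neg hemp]
        have hA : pvStepA nets b
            = nets ++ [PySem.Set.diff (PySem.Set.ofList P) (PySem.Set.ofList nets.flatten)] := by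
          simp only [pvStepA, ← hP]
          rw [if_neg hemp]
        rw [hA]
        apply ih
        intro e
        rw [PySem.Set.mem_update]
        simp only [List.flatten_append, List.flatten_cons, List.flatten_nil, List.append_nil,
          List.mem_append, PySem.Set.mem_diff, PySem.Set.mem_ofList]
        constructor
        · rintro (hu | hp)
          · exact Or.inl ((hinv e).mp hu)
          · by_cases hf : e ∈ nets.flatten
            · exact Or.inl hf
            · exact Or.inr ⟨hp, fun hc => hf hc⟩
        · rintro (hf | ⟨hp, _⟩)
          · exact Or.inl ((hinv e).mpr hf)
          · exact Or.inr hp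

-- ===== VERDICT (by name: the statement is the Claim_ definition above) =====
theorem make_nets_spec : Claim_equal_make_nets := by
  intro bicliques _
  unfold Spec_make_nets make_nets make_nets_alt
  exact (pv_loop_eq _ [] PySem.Set.empty (by simp [PySem.Set.empty])).symm
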